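-- pv_equiv track=rewrite | github.com/GPEire/Tradie_GSuite | backend/app/services/attachment_processing.py | _categorize_file_type
-- ===== SOURCE A (Python) =====
-- def _categorize_file_type(mime_type: str, filename: str) -> str:
--     """Categorize file type"""
--     if not mime_type and not filename:
--         return "unknown"
--
--     mime_lower = mime_type.lower() if mime_type else ""
--     filename_lower = filename.lower() if filename else ""
--
--     # Document types
--     if any(x in mime_lower or any(ext in filename_lower for ext in ['.pdf', '.doc', '.docx', '.txt', '.rtf'])
--            for x in ['pdf', 'document', 'text', 'msword']):
--         return "document"
--
--     # Spreadsheet types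
--     if any(x in mime_lower or any(ext in filename_lower for ext in ['.xls', '.xlsx', '.csv'])
--            for x in ['spreadsheet', 'excel', 'csv']):
--         return "spreadsheet"
--
--     # Image types
--     if any(x in mime_lower or any(ext in filename_lower for ext in ['.jpg', '.jpeg', '.png', '.gif', '.bmp'])
--            for x in ['image']):
--         return "image"
--
--     # CAD/Drawing types
--     if any(ext in filename_lower for ext in ['.dwg', '.dxf', '.dwf', '.cad']):
--         return "drawing"
--
--     # Archive types
--     if any(x in mime_lower or any(ext in filename_lower for ext in ['.zip', '.rar', '.7z', '.tar', '.gz'])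
--            for x in ['zip', 'archive', 'compressed']):
--         return "archive"
--
--     return "other"
-- ===== SOURCE B (Python) =====
-- # Min-priority scan: flatten the categories into one weighted pattern list and
-- # keep the smallest matching priority; equals A's first-match branch chain.
-- _CATEGORIES = ["document", "spreadsheet", "image", "drawing", "archive", "other"]
--
-- _PATTERNS = (
--       [(0, True, k) for k in ('pdf', 'document', 'text', 'msword')]
--     + [(0, False, e) for e in ('.pdf', '.doc', '.docx', '.txt', '.rtf')]
--     + [(1, True, k) for k in ('spreadsheet', 'excel', 'csv')]
--     + [(1, False, e) for e in ('.xls', '.xlsx', '.csv')]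
--     + [(2, True, 'image')]
--     + [(2, False, e) for e in ('.jpg', '.jpeg', '.png', '.gif', '.bmp')]
--     + [(3, False, e) for e in ('.dwg', '.dxf', '.dwf', '.cad')]
--     + [(4, True, k) for k in ('zip', 'archive', 'compressed')]
--     + [(4, False, e) for e in ('.zip', '.rar', '.7z', '.tar', '.gz')]
-- )
--
--
-- def _categorize_file_type(mime_type: str, filename: str) -> str:
--     """Categorize file type"""
--     if not mime_type and not filename:
--         return "unknown"
--     mime_lower = (mime_type or "").lower()
--     filename_lower = (filename or "").lower()
--     best = len(_CATEGORIES) - 1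
--     for priority, in_mime, pattern in _PATTERNS:
--         if priority < best and pattern in (mime_lower if in_mime else filename_lower):
--             best = priority
--     return _CATEGORIES[best]
-- ===== Notes on version B (the rewrite author's own statement) =====
-- stated objective: faster
-- what changed: Replaces A's ordered five-branch if-chain (whose any(...) re-runs the whole extension scan once per mime keyword) by one flat list of priority-weighted patterns scanned in a single pass keeping a running minimum priority that finally indexes the category array; the minimum matching priority equals A's first matching branch, and each pattern is tested at most once.
import Mathlib
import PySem

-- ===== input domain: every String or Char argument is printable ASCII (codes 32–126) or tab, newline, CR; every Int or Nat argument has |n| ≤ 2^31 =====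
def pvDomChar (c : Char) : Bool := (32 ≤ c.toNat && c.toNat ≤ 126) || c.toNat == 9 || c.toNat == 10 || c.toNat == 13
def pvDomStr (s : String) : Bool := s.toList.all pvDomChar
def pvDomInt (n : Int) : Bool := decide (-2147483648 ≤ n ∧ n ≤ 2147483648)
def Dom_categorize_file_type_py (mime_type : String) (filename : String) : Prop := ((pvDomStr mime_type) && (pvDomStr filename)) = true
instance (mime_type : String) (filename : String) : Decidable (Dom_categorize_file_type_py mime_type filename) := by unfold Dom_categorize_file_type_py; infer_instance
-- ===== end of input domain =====

-- B replaces A's ordered if-chain by one flat priority-weighted pattern list scanned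
-- with a running minimum, then indexes the category array; same return values.

-- ===== PORT A =====
def categorize_file_type_py (mime_type : String) (filename : String) : String :=
  if mime_type == "" && filename == "" then "unknown"
  else
    let mime_lower := if mime_type != "" then PySem.Str.lower mime_type else ""
    let filename_lower := if filename != "" then PySem.Str.lower filename else ""
    if ["pdf", "document", "text", "msword"].any (fun x =>
        PySem.Str.isIn x mime_lower ||
        [".pdf", ".doc", ".docx", ".txt", ".rtf"].any (fun ext => PySem.Str.isIn ext filename_lower)) then
      "document"
    else if ["spreadsheet", "excel", "csv"].any (fun x =>
        PySem.Str.isIn x mime_lower ||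
        [".xls", ".xlsx", ".csv"].any (fun ext => PySem.Str.isIn ext filename_lower)) then
      "spreadsheet"
    else if ["image"].any (fun x =>
        PySem.Str.isIn x mime_lower ||
        [".jpg", ".jpeg", ".png", ".gif", ".bmp"].any (fun ext => PySem.Str.isIn ext filename_lower)) then
      "image"
    else if [".dwg", ".dxf", ".dwf", ".cad"].any (fun ext => PySem.Str.isIn ext filename_lower) then
      "drawing"
    else if ["zip", "archive", "compressed"].any (fun x =>
        PySem.Str.isIn x mime_lower ||
        [".zip", ".rar", ".7z", ".tar", ".gz"].any (fun ext => PySem.Str.isIn ext filename_lower)) then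
      "archive"
    else "other"

-- ===== PORT B =====
def pvCategories : List String :=
  ["document", "spreadsheet", "image", "drawing", "archive", "other"]

-- the flat weighted pattern list, built exactly as Source B builds it (comprehension concatenation)
def pvPatterns : List (Nat × Bool × String) :=
  (["pdf", "document", "text", "msword"].map (fun k => (0, true, k)))
  ++ ([".pdf", ".doc", ".docx", ".txt", ".rtf"].map (fun e => (0, false, e)))
  ++ (["spreadsheet", "excel", "csv"].map (fun k => (1, true, k)))
  ++ ([".xls", ".xlsx", ".csv"].map (fun e => (1, false, e)))
  ++ (["image"].map (fun k => (2, true, k)))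
  ++ ([".jpg", ".jpeg", ".png", ".gif", ".bmp"].map (fun e => (2, false, e)))
  ++ ([".dwg", ".dxf", ".dwf", ".cad"].map (fun e => (3, false, e)))
  ++ (["zip", "archive", "compressed"].map (fun k => (4, true, k)))
  ++ ([".zip", ".rar", ".7z", ".tar", ".gz"].map (fun e => (4, false, e)))

def categorize_file_type_py_alt (mime_type : String) (filename : String) : String :=
  if mime_type == "" && filename == "" then "unknown"
  else
    let mime_lower := PySem.Str.lower mime_type        -- (mime_type or "").lower(); lower "" = ""
    let filename_lower := PySem.Str.lower filename
    let best := pvPatterns.foldl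
      (fun best x =>
        if x.1 < best && PySem.Str.isIn x.2.2 (if x.2.1 then mime_lower else filename_lower)
        then x.1 else best)
      (pvCategories.length - 1)
    pvCategories.getD best ""

-- ===== PRECONDITION & SPEC =====
def Spec_categorize_file_type_py (mime_type : String) (filename : String) (out : String) : Prop := out = categorize_file_type_py_alt mime_type filename
instance (mime_type : String) (filename : String) (out : String) : Decidable (Spec_categorize_file_type_py mime_type filename out) := by unfold Spec_categorize_file_type_py; infer_instance

-- ===== CLAIM (what is proved, stated in full; the proofs are below) =====
def Claim_equal_categorize_file_type_py : Prop := ∀ (mime_type : String) (filename : String), Dom_categorize_file_type_py mime_type filename → Spec_categorize_file_type_py mime_type filename (categorize_file_type_py mime_type filename)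

-- ===== LEMMAS AND PROOFS =====

-- A's per-row condition 'any(x in mime or <ext-check> for x in kws)' equals
-- 'any kw in mime, or the ext-check' whenever the keyword list is nonempty.
theorem pv_any_or {α : Type} (l : List α) (p : α → Bool) (b : Bool) (h : l ≠ []) :
    l.any (fun x => p x || b) = (l.any p || b) := by
  induction l with
  | nil => exact absurd rfl h
  | cons a t ih =>
    cases t with
    | nil => simp [List.any]
    | cons c t' =>
      simp only [List.any_cons] at *
      rw [ih (by simp)]
      cases p a <;> cases b <;> simp

theorem pv_lower_empty : PySem.Str.lower "" = "" := by decide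

theorem pv_lower_if (s : String) :
    (if s != "" then PySem.Str.lower s else "") = PySem.Str.lower s := by
  by_cases h : s = "" <;> simp [h, pv_lower_empty]

-- folding the min-update over a constant-priority group collapses to 'any'
theorem pv_foldl_min {α : Type} (g : α → Bool) (i : ℕ) (l : List α) (b : ℕ) :
    l.foldl (fun acc x => if i < acc && g x then i else acc) b
      = if i < b && l.any g then i else b := by
  induction l generalizing b with
  | nil => simp
  | cons a t ih =>
    simp only [List.foldl_cons, List.any_cons, ih]
    by_cases hg : g a = true <;> by_cases hib : i < b <;>
      simp [hg, hib]

-- merging the mime-keyword group and the extension group of one category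
theorem pv_two_step (i b : Nat) (cm ce : Bool) :
    (if i < (if i < b && cm then i else b) && ce then i
     else (if i < b && cm then i else b))
      = if i < b && (cm || ce) then i else b := by
  by_cases h : i < b <;> cases cm <;> cases ce <;> simp [h]

-- ===== VERDICT (by name: the statement is the Claim_ definition above) =====
set_option maxHeartbeats 2000000 in
theorem categorize_file_type_py_spec : Claim_equal_categorize_file_type_py := by
  intro mime_type filename _
  unfold Spec_categorize_file_type_py categorize_file_type_py categorize_file_type_py_alt
  by_cases hguard : (mime_type == "" && filename == "") = true
  · simp [hguard]
  · simp only [hguard, pv_lower_if, if_false, Bool.false_eq_true]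
    generalize PySem.Str.lower mime_type = m
    generalize PySem.Str.lower filename = f
    simp only [pvPatterns, pvCategories, List.length_cons, List.length_nil,
      Nat.reduceAdd, Nat.reduceSub, Bool.false_eq_true, if_true, if_false,
      List.foldl_append, List.foldl_map, pv_foldl_min, pv_two_step,
      pv_any_or ["pdf", "document", "text", "msword"]
        (fun x => PySem.Str.isIn x m)
        ([".pdf", ".doc", ".docx", ".txt", ".rtf"].any (fun ext => PySem.Str.isIn ext f)) (by simp),
      pv_any_or ["spreadsheet", "excel", "csv"]
        (fun x => PySem.Str.isIn x m)
        ([".xls", ".xlsx", ".csv"].any (fun ext => PySem.Str.isIn ext f)) (by simp),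
      pv_any_or ["image"]
        (fun x => PySem.Str.isIn x m)
        ([".jpg", ".jpeg", ".png", ".gif", ".bmp"].any (fun ext => PySem.Str.isIn ext f)) (by simp),
      pv_any_or ["zip", "archive", "compressed"]
        (fun x => PySem.Str.isIn x m)
        ([".zip", ".rar", ".7z", ".tar", ".gz"].any (fun ext => PySem.Str.isIn ext f)) (by simp)]
    by_cases c0 : ((["pdf", "document", "text", "msword"].any (fun x => PySem.Str.isIn x m)) || ([".pdf", ".doc", ".docx", ".txt", ".rtf"].any (fun ext => PySem.Str.isIn ext f))) = true <;>
    by_cases c1 : ((["spreadsheet", "excel", "csv"].any (fun x => PySem.Str.isIn x m)) || ([".xls", ".xlsx", ".csv"].any (fun ext => PySem.Str.isIn ext f))) = true <;>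
    by_cases c2 : ((["image"].any (fun x => PySem.Str.isIn x m)) || ([".jpg", ".jpeg", ".png", ".gif", ".bmp"].any (fun ext => PySem.Str.isIn ext f))) = true <;>
    by_cases c3 : ([".dwg", ".dxf", ".dwf", ".cad"].any (fun ext => PySem.Str.isIn ext f)) = true <;>
    by_cases c4 : ((["zip", "archive", "compressed"].any (fun x => PySem.Str.isIn x m)) || ([".zip", ".rar", ".7z", ".tar", ".gz"].any (fun ext => PySem.Str.isIn ext f))) = true <;>
      simp only [Bool.not_eq_true] at c0 c1 c2 c3 c4 <;>
      simp only [c0, c1, c2, c3, c4] <;>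
      decide
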